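-- pv_equiv track=rewrite | github.com/oguzcan-yavuz/playground | codewars/make_valley.py | make_valley
-- ===== SOURCE A (Python) =====
-- def make_valley(arr):
--     arr = sorted(arr, reverse=True)
--     i = 0
--     left, right = [], []
--     while i < len(arr) - 2 if len(arr) % 2 != 0 else i < len(arr) - 1:
--         left.append(arr[i])
--         right.append(arr[i + 1])
--         i += 2
--     return left + [min(arr)] + right[::-1] if len(arr) % 2 != 0 else left + right[::-1]
-- ===== SOURCE B (Python) =====
-- def make_valley(arr):
--     d = sorted(arr, reverse=True)
--     n = len(d)
--     return [d[2 * j] if 2 * j < n else d[2 * (n - 1 - j) + 1] for j in range(n)]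
-- ===== Notes on version B (the rewrite author's own statement) =====
-- stated objective: alternative
-- what changed: Replaced A's index-stepping while loop with two accumulator lists, a reversal and a separate min() insertion by a single comprehension that computes each output position directly from a closed-form index formula into the sorted-descending list (out[j] = d[2j] while 2j < n, else d[2(n-1-j)+1]); nothing is accumulated or placed.
import Mathlib
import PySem

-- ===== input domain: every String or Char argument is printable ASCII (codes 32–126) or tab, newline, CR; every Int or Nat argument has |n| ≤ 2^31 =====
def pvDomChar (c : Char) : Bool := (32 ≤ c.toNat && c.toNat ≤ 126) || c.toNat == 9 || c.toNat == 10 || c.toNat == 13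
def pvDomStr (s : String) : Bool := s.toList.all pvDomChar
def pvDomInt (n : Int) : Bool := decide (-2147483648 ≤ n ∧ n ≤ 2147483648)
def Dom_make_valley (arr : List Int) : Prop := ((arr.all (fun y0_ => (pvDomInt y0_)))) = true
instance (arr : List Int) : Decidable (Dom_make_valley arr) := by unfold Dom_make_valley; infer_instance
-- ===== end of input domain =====

-- B replaces A's two-accumulator loop + reverse + explicit min insertion by a closed-form
-- index map: out[j] = d[2j] for the descending half, d[2(n-1-j)+1] for the ascending half;
-- objective: alternative (same asymptotic cost, no accumulation at all).

-- ===== PORT A =====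
-- the while loop: i steps by 2; indices i, i+1 are in range whenever the condition holds,
-- so List.getD _ _ 0 is exact for Python's arr[i] / arr[i+1] here.
def loopA (s : List Int) (i : Nat) (left right : List Int) : List Int × List Int :=
  if h : (if s.length % 2 ≠ 0 then i + 2 < s.length else i + 1 < s.length) then
    loopA s (i + 2) (left ++ [s.getD i 0]) (right ++ [s.getD (i + 1) 0])
  else (left, right)
termination_by s.length - i
decreasing_by split at h <;> omega

def make_valley (arr : List Int) : List Int :=
  let s := PySem.List.sorted arr (fun x => x) true
  let p := loopA s 0 [] []
  -- odd length ⇒ s ≠ [], so min? s = some (min of s): Option.toList is exact for [min(arr)]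
  if s.length % 2 ≠ 0 then p.1 ++ (PySem.List.min? s (fun x => x)).toList ++ p.2.reverse
  else p.1 ++ p.2.reverse

-- ===== PORT B =====
-- the comprehension: j ranges over range(n); both indices 2*j and 2*(n-1-j)+1 are
-- provably in range in their branch, so pyGetD _ _ 0 is exact for Python's d[...] here.
def make_valley_alt (arr : List Int) : List Int :=
  let d := PySem.List.sorted arr (fun x => x) true
  let n : Int := PySem.List.len d
  (PySem.List.pyRange 0 n).map (fun j =>
    if 2 * j < n then PySem.List.pyGetD d (2 * j) 0
    else PySem.List.pyGetD d (2 * (n - 1 - j) + 1) 0)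

-- ===== PRECONDITION & SPEC =====
def Spec_make_valley (arr : List Int) (out : List Int) : Prop := out = make_valley_alt arr
instance (arr : List Int) (out : List Int) : Decidable (Spec_make_valley arr out) := by unfold Spec_make_valley; infer_instance

-- ===== CLAIM (what is proved, stated in full; the proofs are below) =====
def Claim_equal_make_valley : Prop := ∀ (arr : List Int), Dom_make_valley arr → Spec_make_valley arr (make_valley arr)

-- ===== LEMMAS AND PROOFS =====

-- the common valley shape: peel the two largest, put them at the ends
def buildValley : List Int → List Int
  | [] => []
  | [x] => [x]
  | x :: y :: t => x :: (buildValley t ++ [y])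

lemma buildValley_length (l : List Int) : (buildValley l).length = l.length := by
  induction l using buildValley.induct with
  | case1 => simp [buildValley]
  | case2 x => simp [buildValley]
  | case3 x y t ih => simp [buildValley, ih]

lemma buildValley_getD (l : List Int) : ∀ j, j < l.length →
    (buildValley l).getD j 0 =
      if 2 * j < l.length then l.getD (2 * j) 0 else l.getD (2 * (l.length - 1 - j) + 1) 0 := by
  induction l using buildValley.induct with
  | case1 => intro j h; simp at h
  | case2 x =>
    intro j h
    have : j = 0 := by simpa using h
    subst this
    simp [buildValley]
  | case3 x y t ih =>
    intro j h
    match j with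
    | 0 => simp [buildValley]
    | j + 1 =>
      have hlen := buildValley_length t
      rw [buildValley, List.getD_cons_succ]
      by_cases hj : j < t.length
      · rw [List.getD_append _ _ _ j (by omega), ih j hj]
        by_cases h2 : 2 * j < t.length
        · have h2' : 2 * (j + 1) < (x :: y :: t).length := by simp; omega
          rw [if_pos h2, if_pos h2']
          have : 2 * (j + 1) = (2 * j) + 1 + 1 := by omega
          rw [this, List.getD_cons_succ, List.getD_cons_succ]
        · have h2' : ¬ 2 * (j + 1) < (x :: y :: t).length := by simp; omega
          rw [if_neg h2, if_neg h2']
          have e1 : 2 * ((x :: y :: t).length - 1 - (j + 1)) + 1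
              = (2 * (t.length - 1 - j) + 1) + 1 + 1 := by simp only [List.length_cons]; omega
          rw [e1, List.getD_cons_succ, List.getD_cons_succ]
      · have hje : j = t.length := by simp at h; omega
        subst hje
        rw [List.getD_append_right _ _ _ _ (by omega)]
        have h2' : ¬ 2 * (t.length + 1) < (x :: y :: t).length := by simp
        rw [if_neg h2']
        have e1 : 2 * ((x :: y :: t).length - 1 - (t.length + 1)) + 1 = 1 := by simp
        rw [e1]
        simp [hlen]

lemma alt_eq_buildValley (arr : List Int) :
    make_valley_alt arr = buildValley (PySem.List.sorted arr (fun x => x) true) := by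
  rw [make_valley_alt]
  set d := PySem.List.sorted arr (fun x => x) true with hd
  have hlen : PySem.List.len d = (d.length : Int) := by simp [PySem.List.len]
  rw [hlen, PySem.List.pyRange_zero_natCast, List.map_map]
  apply List.ext_getElem
  · simp [buildValley_length]
  · intro i h1 h2
    simp only [List.getElem_map, List.getElem_range, Function.comp]
    have hi : i < d.length := by simpa using h1
    have hb := buildValley_getD d i hi
    rw [List.getD_eq_getElem _ _ (by rw [buildValley_length]; exact hi)] at hb
    rw [hb]
    by_cases hc : 2 * i < d.length
    · rw [if_pos hc, if_pos (show (2 : Int) * (i : Int) < (d.length : Int) by omega)]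
      have e : (2 : Int) * (i : Int) = ((2 * i : Nat) : Int) := by omega
      rw [e, PySem.List.pyGetD_natCast]
    · rw [if_neg hc, if_neg (show ¬ (2 : Int) * (i : Int) < (d.length : Int) by omega)]
      have e : 2 * ((d.length : Int) - 1 - (i : Int)) + 1
          = ((2 * (d.length - 1 - i) + 1 : Nat) : Int) := by omega
      rw [e, PySem.List.pyGetD_natCast]

-- the combine step of A, on an already-sorted list
def combineA (s : List Int) : List Int :=
  if s.length % 2 ≠ 0 then
    (loopA s 0 [] []).1 ++ (PySem.List.min? s (fun x => x)).toList ++ (loopA s 0 [] []).2.reverse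
  else (loopA s 0 [] []).1 ++ (loopA s 0 [] []).2.reverse

lemma loopA_acc (s : List Int) (i : Nat) (L R : List Int) :
    loopA s i L R = (L ++ (loopA s i [] []).1, R ++ (loopA s i [] []).2) := by
  generalize hk : s.length - i = k
  induction k using Nat.strong_induction_on generalizing i L R with
  | _ k ih =>
    by_cases hC : (if s.length % 2 ≠ 0 then i + 2 < s.length else i + 1 < s.length)
    · have hlt : i < s.length := by by_cases hp : s.length % 2 ≠ 0 <;> simp [hp] at hC <;> omega
      conv_lhs => rw [loopA]
      conv_rhs => rw [loopA]
      rw [dif_pos hC, dif_pos hC]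
      simp only [List.nil_append]
      rw [ih (s.length - (i + 2)) (by omega) (i + 2) _ _ rfl,
          ih (s.length - (i + 2)) (by omega) (i + 2) [s.getD i 0] [s.getD (i + 1) 0] rfl]
      simp
    · conv_lhs => rw [loopA]
      conv_rhs => rw [loopA]
      rw [dif_neg hC, dif_neg hC]
      simp

lemma loopA_shift (x y : Int) (t : List Int) (i : Nat) (L R : List Int) :
    loopA (x :: y :: t) (i + 2) L R = loopA t i L R := by
  generalize hk : t.length - i = k
  induction k using Nat.strong_induction_on generalizing i L R with
  | _ k ih =>
    have hc : (if (x :: y :: t).length % 2 ≠ 0 then i + 2 + 2 < (x :: y :: t).length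
        else i + 2 + 1 < (x :: y :: t).length)
        ↔ (if t.length % 2 ≠ 0 then i + 2 < t.length else i + 1 < t.length) := by
      simp only [List.length_cons]
      by_cases hp : t.length % 2 ≠ 0
      · have hp2 : (t.length + 1 + 1) % 2 ≠ 0 := by omega
        rw [if_pos hp, if_pos hp2]; omega
      · have hp2 : ¬ (t.length + 1 + 1) % 2 ≠ 0 := by omega
        rw [if_neg hp, if_neg hp2]; omega
    by_cases h' : (if t.length % 2 ≠ 0 then i + 2 < t.length else i + 1 < t.length)
    · conv_lhs => rw [loopA]
      conv_rhs => rw [loopA]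
      rw [dif_pos (hc.mpr h'), dif_pos h']
      have hg1 : (x :: y :: t).getD (i + 2) 0 = t.getD i 0 := by simp [List.getD]
      have hg2 : (x :: y :: t).getD (i + 2 + 1) 0 = t.getD (i + 1) 0 := by simp [List.getD]
      rw [hg1, hg2]
      have hd : i < t.length := by by_cases hp : t.length % 2 ≠ 0 <;> simp [hp] at h' <;> omega
      exact ih (t.length - (i + 2)) (by omega) (i + 2) _ _ rfl
    · conv_lhs => rw [loopA]
      conv_rhs => rw [loopA]
      rw [dif_neg (fun hh => h' (hc.mp hh)), dif_neg h']

lemma combineA_eq_buildValley (s : List Int) (hs : s.Pairwise (fun a b => b ≤ a)) :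
    combineA s = buildValley s := by
  generalize hk : s.length = k
  induction k using Nat.strong_induction_on generalizing s with
  | _ k ih =>
    match s, hk with
    | [], _ =>
      rw [combineA]
      conv_lhs => rw [loopA]
      simp [buildValley]
    | [x], _ =>
      rw [combineA]
      conv_lhs => rw [loopA]
      simp [buildValley, PySem.List.min?_id_cons]
    | x :: y :: t, hk =>
      have hp := hs
      rw [List.pairwise_cons] at hp
      obtain ⟨hx, hp⟩ := hp
      rw [List.pairwise_cons] at hp
      obtain ⟨hy, hpt⟩ := hp
      have hyx : y ≤ x := hx y (by simp)
      have hiht := ih t.length (by simp at hk; omega) t hpt rfl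
      have hcond : (if (x :: y :: t).length % 2 ≠ 0 then 0 + 2 < (x :: y :: t).length
          else 0 + 1 < (x :: y :: t).length) := by
        simp only [List.length_cons]
        by_cases hp2 : (t.length + 1 + 1) % 2 ≠ 0
        · rw [if_pos hp2]; omega
        · rw [if_neg hp2]; omega
      have hloop : loopA (x :: y :: t) 0 [] [] =
          ([x] ++ (loopA t 0 [] []).1, [y] ++ (loopA t 0 [] []).2) := by
        conv_lhs => rw [loopA]
        rw [dif_pos hcond]
        have hg1 : (x :: y :: t).getD 0 0 = x := by simp [List.getD]
        have hg2 : (x :: y :: t).getD (0 + 1) 0 = y := by simp [List.getD]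
        rw [hg1, hg2]
        simp only [List.nil_append]
        rw [loopA_shift, loopA_acc]
      rw [combineA] at hiht ⊢
      simp only [hloop]
      by_cases hpar : (x :: y :: t).length % 2 ≠ 0
      · have hpt' : t.length % 2 ≠ 0 := by simp only [List.length_cons] at hpar; omega
        match t, hpt', hpt, hiht, hx, hy, hpar with
        | h :: t', hpt', hpt, hiht, hx, hy, hpar =>
          have hmin : PySem.List.min? (x :: y :: h :: t') (fun z => z) =
              PySem.List.min? (h :: t') (fun z => z) := by
            rw [PySem.List.min?_id_cons, PySem.List.min?_id_cons]
            have hhy : h ≤ y := hy h (by simp)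
            simp only [List.foldl_cons]
            rw [min_eq_right hyx, min_eq_right hhy]
          rw [if_pos hpt'] at hiht
          rw [if_pos hpar]
          rw [hmin, buildValley, ← hiht]
          simp
      · have hpt' : ¬ t.length % 2 ≠ 0 := by simp only [List.length_cons] at hpar; omega
        rw [if_neg hpt'] at hiht
        rw [if_neg hpar]
        rw [buildValley, ← hiht]
        simp

-- ===== VERDICT (by name: the statement is the Claim_ definition above) =====
theorem make_valley_spec : Claim_equal_make_valley := by
  intro arr _
  show make_valley arr = make_valley_alt arr
  rw [alt_eq_buildValley, make_valley]
  exact combineA_eq_buildValley _ (PySem.List.sorted_pairwise_rev arr (fun x => x))
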